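-- pv_equiv track=rewrite | github.com/heatseeknyc/landlord-lookup-gateway | pylib/nycgeo/mockagent.py | find_bin
-- ===== SOURCE A (Python) =====
-- def find_bin(buildings):
--     rawbin = (r['giBuildingIdentificationNumber'] for r in buildings)
--     allbin = set(rawbin)
--     if len(allbin) == 0:
--         raise ValueError("invalid response struct")
--     if len(allbin) == 1:
--         return list(allbin)[0]
--     else:
--         return None
-- ===== SOURCE B (Python) =====
-- def find_bin(buildings):
--     if not buildings:
--         raise ValueError("invalid response struct")
--     ref = buildings[0]['giBuildingIdentificationNumber']
--     for r in buildings[1:]: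
--         if r['giBuildingIdentificationNumber'] != ref:
--             return None
--     return ref
-- ===== Notes on version B (the rewrite author's own statement) =====
-- stated objective: alternative
-- what changed: Replaces building a set of all IDs and counting its size by a single early-exit pass comparing every record's ID to the first record's ID.
-- outside the precondition, e.g. on find_bin([]): A raises ValueError, B raises ValueError; on find_bin([{}]): A raises KeyError, B raises KeyError
import Mathlib
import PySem

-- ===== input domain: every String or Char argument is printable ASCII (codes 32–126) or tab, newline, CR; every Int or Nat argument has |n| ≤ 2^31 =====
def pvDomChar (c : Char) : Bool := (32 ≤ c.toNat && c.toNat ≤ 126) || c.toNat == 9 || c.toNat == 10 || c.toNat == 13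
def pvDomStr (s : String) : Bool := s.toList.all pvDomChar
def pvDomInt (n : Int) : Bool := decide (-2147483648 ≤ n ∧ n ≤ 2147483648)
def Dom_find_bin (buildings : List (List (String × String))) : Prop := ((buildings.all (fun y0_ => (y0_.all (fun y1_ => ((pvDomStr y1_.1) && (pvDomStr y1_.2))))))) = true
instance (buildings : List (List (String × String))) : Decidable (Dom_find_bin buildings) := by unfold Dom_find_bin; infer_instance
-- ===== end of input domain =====

-- B replaces "collect the set of all IDs, then count it" by a single early-exit pass
-- comparing each record's ID against the first record's ID (objective: alternative).

-- dict lookup r['giBuildingIdentificationNumber'] (first match; Pre_ guarantees the key exists)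
def pvId (r : List (String × String)) : String :=
  (r.lookup "giBuildingIdentificationNumber").getD ""

-- ===== PORT A =====
def find_bin (buildings : List (List (String × String))) : Option String :=
  let allbin := PySem.Set.ofList (buildings.map pvId)
  if allbin.length = 0 then none
  else if allbin.length = 1 then PySem.List.pyGet? allbin 0
  else none

-- ===== PORT B =====
def find_bin_alt (buildings : List (List (String × String))) : Option String :=
  match buildings with
  | [] => none
  | r :: rest =>
    let ref := pvId r
    if rest.all (fun x => pvId x == ref) then some ref else none

-- ===== PRECONDITION & SPEC =====
-- Pre_ excludes exactly the inputs where Python A raises: the empty list (ValueError)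
-- and records missing the key (KeyError).
def Pre_find_bin (buildings : List (List (String × String))) : Prop :=
  buildings ≠ [] ∧ ∀ r ∈ buildings, "giBuildingIdentificationNumber" ∈ r.map Prod.fst
instance (buildings : List (List (String × String))) : Decidable (Pre_find_bin buildings) := by unfold Pre_find_bin; infer_instance

def pvWitness_find_bin : (List (List (String × String))) :=
  [[("giBuildingIdentificationNumber", "1000000")], [("giBuildingIdentificationNumber", "1000000")]]

def Spec_find_bin (buildings : List (List (String × String))) (out : Option String) : Prop := out = find_bin_alt buildings
instance (buildings : List (List (String × String))) (out : Option String) : Decidable (Spec_find_bin buildings out) := by unfold Spec_find_bin; infer_instance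

-- ===== CLAIM (what is proved, stated in full; the proofs are below) =====
def Claim_equal_find_bin : Prop := ∀ (buildings : List (List (String × String))), Dom_find_bin buildings → Pre_find_bin buildings → Spec_find_bin buildings (find_bin buildings)

-- ===== LEMMAS AND PROOFS =====

theorem ofList_all_eq {x : String} {l : List String} (h : l.all (· == x)) :
    PySem.Set.ofList (x :: l) = [x] := by
  induction l with
  | nil => rfl
  | cons y t ih =>
    simp only [List.all_cons, Bool.and_eq_true, beq_iff_eq] at h
    obtain ⟨heq, ht⟩ := h
    have hstep : PySem.Set.ofList (x :: y :: t) = PySem.Set.ofList (x :: t) := by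
      rw [heq]
      simp [PySem.Set.ofList, List.foldl, PySem.Set.add, PySem.Set.contains]
    rw [hstep, ih ht]

theorem ofList_two_le {x : String} {l : List String} (h : ¬ l.all (· == x)) :
    2 ≤ (PySem.Set.ofList (x :: l)).length := by
  simp only [List.all_eq_true, beq_iff_eq, not_forall] at h
  obtain ⟨y, hy, hne⟩ := h
  have hx : x ∈ PySem.Set.ofList (x :: l) := by
    rw [PySem.Set.mem_ofList]; exact List.mem_cons_self
  have hy' : y ∈ PySem.Set.ofList (x :: l) := by
    rw [PySem.Set.mem_ofList]; exact List.mem_cons_of_mem _ hy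
  rcases hs : PySem.Set.ofList (x :: l) with _ | ⟨a, _ | ⟨b, t⟩⟩
  · rw [hs] at hx; simp at hx
  · rw [hs] at hx hy'
    simp only [List.mem_singleton] at hx hy'
    exact absurd (hy'.trans hx.symm) hne
  · simp

theorem find_bin_spec' (buildings : List (List (String × String)))
    (hpre : Pre_find_bin buildings) : find_bin buildings = find_bin_alt buildings := by
  obtain ⟨hne, -⟩ := hpre
  match buildings with
  | [] => exact absurd rfl hne
  | r :: rest =>
    show find_bin (r :: rest) = find_bin_alt (r :: rest)
    unfold find_bin find_bin_alt
    simp only [List.map_cons]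
    by_cases hall : rest.all (fun x => pvId x == pvId r)
    · have hmap : (rest.map pvId).all (· == pvId r) := by
        rw [List.all_map]; exact hall
      rw [ofList_all_eq hmap]
      simp [hall, PySem.List.pyGet?, PySem.List.pyIdx?]
    · have hmap : ¬ (rest.map pvId).all (· == pvId r) := by
        rw [List.all_map]; exact hall
      have h2 := ofList_two_le hmap
      have h0 : (PySem.Set.ofList (pvId r :: rest.map pvId)).length ≠ 0 := by omega
      have h1 : (PySem.Set.ofList (pvId r :: rest.map pvId)).length ≠ 1 := by omega
      simp [h0, h1, hall]

-- ===== VERDICT (by name: the statement is the Claim_ definition above) =====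
theorem find_bin_spec : Claim_equal_find_bin := by
  intro buildings _ hpre
  exact find_bin_spec' buildings hpre
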